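-- pv_equiv track=rewrite | github.com/kimjune01/june.kim | worklog/h27_correct_model.py | greedy_spanner
-- ===== SOURCE A (Python) =====
-- def temporal_reachability(n, timestamps, edge_set=None):
--     """
--     Compute all temporally reachable pairs.
--
--     A temporal journey from u to v: sequence of edges e1, e2, ..., el
--     where consecutive edges share a vertex and t(e1) < t(e2) < ... < t(el).
--
--     If edge_set is None, use all edges. Otherwise, only use edges in edge_set.
--     """
--     # Build sorted edge list
--     if edge_set is None:
--         edge_set = set(timestamps.keys())
--
--     edges = [(e, timestamps[e]) for e in edge_set]
--     edges.sort(key=lambda x: x[1])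
--
--     # BFS-style: for each source, compute reachable set
--     reachable = set()
--     for src in range(n):
--         # earliest[v] = earliest time we can be at v (starting from src at time 0)
--         earliest = {src: 0}
--         for edge, t in edges:
--             u, v = tuple(edge)
--             if u in earliest and t > earliest[u]:
--                 if v not in earliest or t < earliest[v]:
--                     earliest[v] = t
--             if v in earliest and t > earliest[v]:
--                 if u not in earliest or t < earliest[u]:
--                     earliest[u] = t
--         for v in earliest:
--             if v != src:
--                 reachable.add((src, v))
--
--     return reachable
--
-- def greedy_spanner(n, timestamps):
--     """
--     Build a greedy temporal spanner: add edges that cover the most new pairs.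
--     """
--     full_reach = temporal_reachability(n, timestamps)
--
--     spanner_edges = set()
--     covered = set()
--
--     all_edges = list(timestamps.keys())
--
--     while covered != full_reach:
--         best_edge = None
--         best_gain = 0
--
--         for e in all_edges:
--             if e in spanner_edges:
--                 continue
--             test = spanner_edges | {e}
--             new_covered = temporal_reachability(n, timestamps, test)
--             gain = len(new_covered - covered)
--             if gain > best_gain:
--                 best_gain = gain
--                 best_edge = e
--
--         if best_edge is None or best_gain == 0:
--             break
--
--         spanner_edges.add(best_edge)
--         covered = temporal_reachability(n, timestamps, spanner_edges)
--
--     return spanner_edges, len(covered), len(full_reach)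
-- ===== SOURCE B (Python) =====
-- def greedy_spanner(n, timestamps):
--     """
--     Greedy temporal spanner, restructured: reachability is computed for all
--     sources in ONE pass over the sorted edges (edges outer, per-source maps in
--     a list), and the best candidate's reach set is cached so 'covered' is never
--     recomputed after an edge is added.
--     """
--     all_edges = list(timestamps.keys())
--
--     def reach(edge_list):
--         edges = sorted(edge_list, key=lambda p: p[1])
--         state = [{src: 0} for src in range(n)]
--         for (u, v), t in edges:
--             nxt = []
--             for d in state:
--                 eu = d.get(u)
--                 ev = d.get(v)
--                 if eu is not None and t > eu and (ev is None or t < ev):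
--                     d = dict(d)
--                     d[v] = t
--                 ev = d.get(v)
--                 eu = d.get(u)
--                 if ev is not None and t > ev and (eu is None or t < eu):
--                     d = dict(d)
--                     d[u] = t
--                 nxt.append(d)
--             state = nxt
--         return {(src, v) for src, d in zip(range(n), state) for v in d if v != src}
--
--     full_reach = reach([(e, timestamps[e]) for e in all_edges])
--     spanner = []
--     covered = set()
--     while covered != full_reach:
--         best = None          # (edge, its reach set)
--         best_gain = 0
--         for e in all_edges:
--             if e in spanner:
--                 continue
--             nc = reach([(f, timestamps[f]) for f in spanner] + [(e, timestamps[e])])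
--             gain = len(nc - covered)
--             if gain > best_gain:
--                 best_gain = gain
--                 best = (e, nc)
--         if best is None:
--             break
--         spanner.append(best[0])
--         covered = best[1]
--     return set(spanner), len(covered), len(full_reach)
-- ===== Notes on version B (the rewrite author's own statement) =====
-- stated objective: alternative
-- what changed: Reachability is computed for all sources in one pass over the time-sorted edges (edges outer, list of per-source earliest maps, loop interchange) instead of re-running the edge scan per source, and the greedy loop keeps the spanner as an ordered list and caches the winning candidate's reach set so 'covered' is never recomputed after adding an edge.
import Mathlib
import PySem

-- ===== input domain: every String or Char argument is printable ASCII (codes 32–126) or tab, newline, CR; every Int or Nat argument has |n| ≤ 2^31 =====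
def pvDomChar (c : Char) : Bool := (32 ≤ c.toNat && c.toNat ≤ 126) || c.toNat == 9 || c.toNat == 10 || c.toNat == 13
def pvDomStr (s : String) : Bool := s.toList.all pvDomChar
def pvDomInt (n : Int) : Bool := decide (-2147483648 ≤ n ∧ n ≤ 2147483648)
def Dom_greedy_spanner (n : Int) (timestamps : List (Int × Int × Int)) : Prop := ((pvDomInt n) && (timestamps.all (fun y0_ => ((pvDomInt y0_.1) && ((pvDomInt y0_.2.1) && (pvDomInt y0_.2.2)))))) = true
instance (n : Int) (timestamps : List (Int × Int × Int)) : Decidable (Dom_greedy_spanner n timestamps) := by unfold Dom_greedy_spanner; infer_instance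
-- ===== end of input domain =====

-- B restructures the greedy spanner: reachability for all sources in one pass over the
-- sorted edges (edges outer, list of per-source maps) and the best candidate's reach set
-- cached so 'covered' is never recomputed; same results (objective: alternative).

-- ===== PORT A =====
-- one edge-relaxation step of A's inner loop (the two sequential 'if's on 'earliest')
def pvStepA (d : PySem.Dict Int Int) (u v t : Int) : PySem.Dict Int Int :=
  let d1 :=
    match d.get? u with
    | some eu =>
      if t > eu then
        match d.get? v with
        | none => d.insert v t
        | some ev => if t < ev then d.insert v t else d
      else d
    | none => d
  match d1.get? v with
  | some ev =>
    if t > ev then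
      match d1.get? u with
      | none => d1.insert u t
      | some eu => if t < eu then d1.insert u t else d1
    else d1
  | none => d1

-- temporal_reachability: per source, fold the time-sorted edges over an 'earliest' dict.
-- timestamps[e]: at every call site e is a key of ts, so getD's default is never read.
def pvTempReach (n : Int) (ts : PySem.Dict (Int × Int) Int)
    (edge_set : Option (List (Int × Int))) : PySem.Set (Int × Int) :=
  let es : List (Int × Int) :=
    match edge_set with
    | none => PySem.Set.ofList ts.keys
    | some s => s
  let edges := PySem.List.sorted (es.map (fun e => (e, ts.getD e 0))) (fun p => p.2) false
  (PySem.List.pyRange 0 n 1).foldl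
    (fun reach src =>
      let earliest :=
        edges.foldl (fun d p => pvStepA d p.1.1 p.1.2 p.2)
          ((PySem.Dict.empty : PySem.Dict Int Int).insert src 0)
      earliest.keys.foldl
        (fun r v => if v ≠ src then PySem.Set.add r (src, v) else r) reach)
    PySem.Set.empty

-- the greedy while-loop; fuel = |all_edges| + 1 strictly bounds the iterations
-- (each round adds an edge of all_edges not yet in the spanner, then one final scan breaks)
def pvLoopA (n : Int) (ts : PySem.Dict (Int × Int) Int) (all_edges : List (Int × Int))
    (full : PySem.Set (Int × Int)) :
    Nat → PySem.Set (Int × Int) → PySem.Set (Int × Int) →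
    PySem.Set (Int × Int) × PySem.Set (Int × Int)
  | 0, spanner, covered => (spanner, covered)
  | fuel + 1, spanner, covered =>
    if PySem.Set.equal covered full then (spanner, covered)
    else
      let bb :=
        all_edges.foldl
          (fun (acc : Option (Int × Int) × Int) e =>
            if PySem.Set.contains spanner e then acc
            else
              let test := PySem.Set.union spanner [e]
              let nc := pvTempReach n ts (some test)
              let gain := PySem.Set.len (PySem.Set.diff nc covered)
              if gain > acc.2 then (some e, gain) else acc)
          (none, 0)
      match bb.1 with
      | none => (spanner, covered)
      | some be =>
        if bb.2 == 0 then (spanner, covered)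
        else
          let spanner' := PySem.Set.add spanner be
          let covered' := pvTempReach n ts (some spanner')
          pvLoopA n ts all_edges full fuel spanner' covered'

def greedy_spanner (n : Int) (timestamps : List (Int × Int × Int)) :
    (List (Int × Int)) × Int × Int :=
  let ts := PySem.Dict.ofList (timestamps.map (fun x => ((x.1, x.2.1), x.2.2)))
  let full := pvTempReach n ts none
  let all_edges := ts.keys
  let res := pvLoopA n ts all_edges full (all_edges.length + 1) PySem.Set.empty PySem.Set.empty
  (res.1, PySem.Set.len res.2, PySem.Set.len full)

-- ===== PORT B =====
-- one edge-relaxation step of B's inner loop (the two boolean guards over d.get)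
def pvStepB (d : PySem.Dict Int Int) (u v t : Int) : PySem.Dict Int Int :=
  let eu := d.get? u
  let ev := d.get? v
  let d1 :=
    if (eu.any fun x => decide (t > x)) && (ev.all fun y => decide (t < y)) then
      d.insert v t
    else d
  let ev2 := d1.get? v
  let eu2 := d1.get? u
  if (ev2.any fun x => decide (t > x)) && (eu2.all fun y => decide (t < y)) then
    d1.insert u t
  else d1

-- B's reach: all sources at once — fold the sorted edges OUTER, mapping the step over the
-- list of per-source 'earliest' maps, then collect the pairs from range(n) zipped with state.
def pvReachB (n : Int) (edge_list : List ((Int × Int) × Int)) : PySem.Set (Int × Int) :=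
  let edges := PySem.List.sorted edge_list (fun p => p.2) false
  let init := (PySem.List.pyRange 0 n 1).map
    (fun src => (PySem.Dict.empty : PySem.Dict Int Int).insert src 0)
  let state := edges.foldl (fun st p => st.map (fun d => pvStepB d p.1.1 p.1.2 p.2)) init
  ((PySem.List.pyRange 0 n 1).zip state).foldl
    (fun r sd =>
      sd.2.keys.foldl (fun r v => if v ≠ sd.1 then PySem.Set.add r (sd.1, v) else r) r)
    PySem.Set.empty

-- B's greedy loop: spanner kept as a plain list, the winning candidate's reach set cached
def pvLoopB (n : Int) (ts : PySem.Dict (Int × Int) Int) (all_edges : List (Int × Int))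
    (full : PySem.Set (Int × Int)) :
    Nat → List (Int × Int) → PySem.Set (Int × Int) →
    List (Int × Int) × PySem.Set (Int × Int)
  | 0, spanner, covered => (spanner, covered)
  | fuel + 1, spanner, covered =>
    if PySem.Set.equal covered full then (spanner, covered)
    else
      let bb :=
        all_edges.foldl
          (fun (acc : Option ((Int × Int) × PySem.Set (Int × Int)) × Int) e =>
            if spanner.contains e then acc
            else
              let nc := pvReachB n
                (spanner.map (fun f => (f, ts.getD f 0)) ++ [(e, ts.getD e 0)])
              let gain := PySem.Set.len (PySem.Set.diff nc covered)
              if gain > acc.2 then (some (e, nc), gain) else acc)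
          (none, 0)
      match bb.1 with
      | none => (spanner, covered)
      | some (be, nc) => pvLoopB n ts all_edges full fuel (spanner ++ [be]) nc

def greedy_spanner_alt (n : Int) (timestamps : List (Int × Int × Int)) :
    (List (Int × Int)) × Int × Int :=
  let ts := PySem.Dict.ofList (timestamps.map (fun x => ((x.1, x.2.1), x.2.2)))
  let all_edges := ts.keys
  let full := pvReachB n (all_edges.map (fun e => (e, ts.getD e 0)))
  let res := pvLoopB n ts all_edges full (all_edges.length + 1) [] PySem.Set.empty
  (res.1, PySem.Set.len res.2, PySem.Set.len full)

-- ===== PRECONDITION & SPEC =====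
def Spec_greedy_spanner (n : Int) (timestamps : List (Int × Int × Int)) (out : (List (Int × Int)) × Int × Int) : Prop := out = greedy_spanner_alt n timestamps
instance (n : Int) (timestamps : List (Int × Int × Int)) (out : (List (Int × Int)) × Int × Int) : Decidable (Spec_greedy_spanner n timestamps out) := by unfold Spec_greedy_spanner; infer_instance

-- ===== CLAIM (what is proved, stated in full; the proofs are below) =====
def Claim_equal_greedy_spanner : Prop := ∀ (n : Int) (timestamps : List (Int × Int × Int)), Dom_greedy_spanner n timestamps → Spec_greedy_spanner n timestamps (greedy_spanner n timestamps)

-- ===== LEMMAS AND PROOFS =====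

-- the two edge-relaxation steps coincide
lemma pvStep_eq (d : PySem.Dict Int Int) (u v t : Int) : pvStepA d u v t = pvStepB d u v t := by
  unfold pvStepA pvStepB
  cases hu : d.get? u <;> cases hv : d.get? v <;>
    simp [Option.any, Option.all] <;> split_ifs <;> simp_all

-- loop interchange: folding a mapped step over the state list = mapping the per-element fold
lemma pvFoldl_map_swap {α β : Type} (L : List β) (g : β → α → α) (init : List α) :
    L.foldl (fun st p => st.map (fun d => g p d)) init
      = init.map (fun d => L.foldl (fun d p => g p d) d) := by
  induction L generalizing init with
  | nil => simp
  | cons h t ih => simp [List.foldl_cons, ih, List.map_map]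

-- A's reachability on an explicit edge set = B's reachability on the looked-up pairs
lemma pvZipMap {α β : Type} (l : List α) (f : α → β) :
    l.zip (l.map f) = l.map (fun x => (x, f x)) := by
  induction l with
  | nil => simp
  | cons h t ih => simp [ih]

-- A's reachability on an explicit edge set = B's reachability on the looked-up pairs
lemma pvReach_eq (n : Int) (ts : PySem.Dict (Int × Int) Int) (es : List (Int × Int)) :
    pvTempReach n ts (some es) = pvReachB n (es.map (fun e => (e, ts.getD e 0))) := by
  unfold pvTempReach pvReachB
  dsimp only
  rw [pvFoldl_map_swap, List.map_map, pvZipMap, List.foldl_map]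
  simp [Function.comp, pvStep_eq]

lemma pvReach_none_eq (n : Int) (ts : PySem.Dict (Int × Int) Int) (h : ts.keys.Nodup) :
    pvTempReach n ts none = pvReachB n (ts.keys.map (fun e => (e, ts.getD e 0))) := by
  rw [← pvReach_eq]
  unfold pvTempReach
  simp only [PySem.Set.ofList_eq_self_of_nodup ts.keys h]

-- the relation the two candidate scans preserve: same best gain, same best edge, and
-- B's cached reach set is exactly the recomputation A performs after adding that edge
def pvRel (n : Int) (ts : PySem.Dict (Int × Int) Int) (spanner : PySem.Set (Int × Int))
    (a : Option (Int × Int) × Int)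
    (b : Option ((Int × Int) × PySem.Set (Int × Int)) × Int) : Prop :=
  a.2 = b.2 ∧ 0 ≤ a.2 ∧
    ((a.1 = none ∧ b.1 = none) ∨
      ∃ e nc, a.1 = some e ∧ b.1 = some (e, nc) ∧ List.contains spanner e = false ∧ 0 < a.2 ∧
        nc = pvReachB n ((spanner ++ [e]).map (fun f => (f, ts.getD f 0))))

lemma pvScan_rel (n : Int) (ts : PySem.Dict (Int × Int) Int) (spanner covered : PySem.Set (Int × Int))
    (l : List (Int × Int)) :
    ∀ (accA : Option (Int × Int) × Int)
      (accB : Option ((Int × Int) × PySem.Set (Int × Int)) × Int),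
      pvRel n ts spanner accA accB →
      pvRel n ts spanner
        (l.foldl
          (fun (acc : Option (Int × Int) × Int) e =>
            if PySem.Set.contains spanner e then acc
            else
              let test := PySem.Set.union spanner [e]
              let nc := pvTempReach n ts (some test)
              let gain := PySem.Set.len (PySem.Set.diff nc covered)
              if gain > acc.2 then (some e, gain) else acc)
          accA)
        (l.foldl
          (fun (acc : Option ((Int × Int) × PySem.Set (Int × Int)) × Int) e =>
            if List.contains spanner e then acc
            else
              let nc := pvReachB n
                (spanner.map (fun f => (f, ts.getD f 0)) ++ [(e, ts.getD e 0)])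
              let gain := PySem.Set.len (PySem.Set.diff nc covered)
              if gain > acc.2 then (some (e, nc), gain) else acc)
          accB) := by
  induction l with
  | nil => intro accA accB h; exact h
  | cons e l ih =>
    intro accA accB h
    rw [List.foldl_cons, List.foldl_cons]
    by_cases hc : PySem.Set.contains spanner e = true
    · have hc' : List.contains spanner e = true := by
        simpa [PySem.Set.contains_eq_listContains] using hc
      simp only [hc, hc', if_true]
      exact ih accA accB h
    · have hc' : List.contains spanner e = false := by
        simp only [PySem.Set.contains_eq_listContains] at hc
        simpa using hc
      have hnm : e ∉ spanner := by simpa using hc'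
      have hnc : pvTempReach n ts (some (PySem.Set.union spanner [e]))
          = pvReachB n (spanner.map (fun f => (f, ts.getD f 0)) ++ [(e, ts.getD e 0)]) := by
        have hu : PySem.Set.union spanner [e] = spanner ++ [e] := by
          simp [PySem.Set.union, PySem.Set.update, PySem.Set.add_of_not_mem hnm]
        rw [hu, pvReach_eq]
        simp
      simp only [hc, hc', if_false, Bool.false_eq_true]
      rw [hnc]
      rw [h.1]
      by_cases hg :
          PySem.Set.len (PySem.Set.diff
            (pvReachB n (spanner.map (fun f => (f, ts.getD f 0)) ++ [(e, ts.getD e 0)]))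
            covered) > accB.2
      · simp only [hg, if_true]
        refine ih _ _ ⟨rfl, ?_, Or.inr ⟨e, _, rfl, rfl, hc', ?_, ?_⟩⟩
        · have := h.2.1; rw [h.1] at this; omega
        · have := h.2.1; rw [h.1] at this; omega
        · simp
      · simp only [hg, if_false]
        exact ih accA accB h

-- the two greedy loops agree step for step
lemma pvLoop_eq (n : Int) (ts : PySem.Dict (Int × Int) Int) (all_edges : List (Int × Int))
    (full : PySem.Set (Int × Int)) :
    ∀ (fuel : Nat) (spanner covered : PySem.Set (Int × Int)),
      pvLoopA n ts all_edges full fuel spanner covered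
        = pvLoopB n ts all_edges full fuel spanner covered := by
  intro fuel
  induction fuel with
  | zero => intro s c; rfl
  | succ k ih =>
    intro spanner covered
    rw [pvLoopA, pvLoopB]
    by_cases hq : PySem.Set.equal covered full = true
    · simp only [hq, if_true]
    · simp only [hq, if_false, Bool.false_eq_true]
      have hrel := pvScan_rel n ts spanner covered all_edges (none, 0) (none, 0)
        ⟨rfl, le_refl 0, Or.inl ⟨rfl, rfl⟩⟩
      dsimp only at hrel
      obtain ⟨h2, hpos, hcase⟩ := hrel
      rcases hcase with ⟨ha, hb⟩ | ⟨e, nc, ha, hb, hcf, hgp, hncv⟩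
      · rw [ha, hb]
      · rw [ha, hb]
        dsimp only
        split_ifs with h0
        · exfalso; simp only [beq_iff_eq] at h0; omega
        · have hnm : e ∉ spanner := by simpa using hcf
          rw [PySem.Set.add_of_not_mem hnm, pvReach_eq, ← hncv]
          exact ih (spanner ++ [e]) nc

-- ===== VERDICT (by name: the statement is the Claim_ definition above) =====
theorem greedy_spanner_spec : Claim_equal_greedy_spanner := by
  intro n timestamps _
  unfold Spec_greedy_spanner greedy_spanner greedy_spanner_alt
  dsimp only
  rw [pvReach_none_eq n _ (PySem.Dict.nodup_keys_ofList _), pvLoop_eq]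
  rfl
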